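-- pv_equiv track=rewrite | github.com/YeoJune/20252R0136COSE36203 | 5_evaluate_vs_rule_based.py | _evaluate_hand_simple
-- ===== SOURCE A (Python) =====
-- def _evaluate_hand_simple(hole, board):
--     """
--     Simplified hand evaluation
--     Returns a score (higher is better)
--     """
--     all_cards = hole + board
--     if not all_cards:
--         return 0
--
--     # Extract ranks
--     rank_values = {'2': 2, '3': 3, '4': 4, '5': 5, '6': 6, '7': 7, '8': 8,
--                   '9': 9, 'T': 10, 'J': 11, 'Q': 12, 'K': 13, 'A': 14}
--
--     ranks = [rank_values.get(card[0], 0) for card in all_cards]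
--
--     # Simple evaluation: sum of card values
--     return sum(sorted(ranks, reverse=True)[:5])
-- ===== SOURCE B (Python) =====
-- def _evaluate_hand_simple(hole, board):
--     """Counting-sort style top-5 selection instead of sorting the ranks."""
--     rank_values = {'2': 2, '3': 3, '4': 4, '5': 5, '6': 6, '7': 7, '8': 8,
--                    '9': 9, 'T': 10, 'J': 11, 'Q': 12, 'K': 13, 'A': 14}
--     counts = [0] * 15
--     for card in hole + board:
--         counts[rank_values.get(card[0], 0)] += 1
--     total = 0
--     need = 5
--     for v in range(14, 1, -1):
--         take = min(counts[v], need)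
--         total += v * take
--         need -= take
--         if need == 0:
--             break
--     return total
-- ===== Notes on version B (the rewrite author's own statement) =====
-- stated objective: alternative
-- what changed: Replaces sorted(ranks, reverse=True)[:5] with a 15-slot rank histogram built in one pass and a countdown scan 14..2 that takes up to the 5 still-needed cards per rank (counting-sort top-k selection); the empty-hand guard disappears because an empty histogram yields 0.
-- outside the precondition, e.g. on _evaluate_hand_simple([''], []): A raises IndexError, B raises IndexError
import Mathlib
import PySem

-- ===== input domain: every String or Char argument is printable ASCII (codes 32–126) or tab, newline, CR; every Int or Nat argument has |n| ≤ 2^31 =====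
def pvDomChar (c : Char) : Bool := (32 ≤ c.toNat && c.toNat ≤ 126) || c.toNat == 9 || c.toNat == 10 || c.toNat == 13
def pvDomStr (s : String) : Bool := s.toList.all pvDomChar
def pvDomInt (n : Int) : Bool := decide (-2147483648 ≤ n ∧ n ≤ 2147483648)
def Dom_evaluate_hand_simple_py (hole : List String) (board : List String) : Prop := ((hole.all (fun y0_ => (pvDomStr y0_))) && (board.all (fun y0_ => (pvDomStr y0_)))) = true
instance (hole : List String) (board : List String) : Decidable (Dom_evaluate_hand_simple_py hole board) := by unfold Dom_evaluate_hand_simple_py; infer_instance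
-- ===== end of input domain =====

-- B replaces sorted(ranks, reverse=True)[:5] by a 15-slot rank histogram plus a 14..2
-- countdown scan taking up to the 5 still-needed cards per rank (counting-sort top-k);
-- objective: alternative (same answer by a different algorithm).

-- ===== PORT A =====
-- rank_values.get(c, 0), shared card-rank data of both Pythons
def rankVal (c : Char) : Int :=
  match c with
  | '2' => 2 | '3' => 3 | '4' => 4 | '5' => 5 | '6' => 6 | '7' => 7 | '8' => 8
  | '9' => 9 | 'T' => 10 | 'J' => 11 | 'Q' => 12 | 'K' => 13 | 'A' => 14
  | _ => 0

-- card[0] (exact where the string is nonempty, i.e. under Pre_; Python raises on "")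
def cardRank (card : String) : Int :=
  match card.toList with
  | [] => 0
  | c :: _ => rankVal c

def evaluate_hand_simple_py (hole : List String) (board : List String) : Int :=
  let all_cards := hole ++ board
  if all_cards = [] then 0
  else
    let ranks := all_cards.map (fun card => cardRank card)
    ((PySem.List.sorted ranks (fun x => x) true).take 5).sum

-- ===== PORT B =====
-- the 'for v in range(14, 1, -1)' loop with the break on need == 0
def scanDown (counts : List Int) : Nat → Int → Int → Int
  | 0, _, total => total
  | 1, _, total => total
  | v+2, need, total =>
    let take := min (counts.getD (v+2) 0) need
    let total' := total + ((v : Int) + 2) * take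
    let need' := need - take
    if need' = 0 then total' else scanDown counts (v+1) need' total'

def evaluate_hand_simple_py_alt (hole : List String) (board : List String) : Int :=
  let counts := (hole ++ board).foldl
    (fun cnt card => cnt.modify (cardRank card).toNat (· + 1)) (List.replicate 15 0)
  scanDown counts 14 5 0

-- ===== PRECONDITION & SPEC =====
-- Pre_ excludes only inputs containing an empty card string, where card[0] raises IndexError in both Pythons.
def Pre_evaluate_hand_simple_py (hole : List String) (board : List String) : Prop :=
  ∀ card ∈ hole ++ board, card ≠ ""
instance (hole : List String) (board : List String) : Decidable (Pre_evaluate_hand_simple_py hole board) := by unfold Pre_evaluate_hand_simple_py; infer_instance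
def pvWitness_evaluate_hand_simple_py : List String × List String := (["Ah", "Kd"], ["2c", "Ts", "Td"])

def Spec_evaluate_hand_simple_py (hole : List String) (board : List String) (out : Int) : Prop := out = evaluate_hand_simple_py_alt hole board
instance (hole : List String) (board : List String) (out : Int) : Decidable (Spec_evaluate_hand_simple_py hole board out) := by unfold Spec_evaluate_hand_simple_py; infer_instance

-- ===== CLAIM (what is proved, stated in full; the proofs are below) =====
def Claim_equal_evaluate_hand_simple_py : Prop := ∀ (hole : List String) (board : List String), Dom_evaluate_hand_simple_py hole board → Pre_evaluate_hand_simple_py hole board → Spec_evaluate_hand_simple_py hole board (evaluate_hand_simple_py hole board)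

-- ===== LEMMAS AND PROOFS =====

-- the multiset of ranks laid out in descending order, rank v down to rank 0
def descFrom (c : Int → Nat) : Nat → List Int
  | 0 => List.replicate (c 0) 0
  | v+1 => List.replicate (c (v+1)) ((v : Int) + 1) ++ descFrom c v

theorem rankVal_bounds (c : Char) : 0 ≤ rankVal c ∧ rankVal c ≤ 14 ∧ rankVal c ≠ 1 := by
  unfold rankVal; split <;> norm_num

theorem cardRank_bounds (card : String) : 0 ≤ cardRank card ∧ cardRank card ≤ 14 ∧ cardRank card ≠ 1 := by
  unfold cardRank; split
  · norm_num
  · exact rankVal_bounds _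

theorem count_descFrom (c : Int → Nat) (v : Nat) (x : Int) :
    (descFrom c v).count x = if 0 ≤ x ∧ x ≤ (v : Int) then c x else 0 := by
  induction v with
  | zero =>
    simp only [descFrom, List.count_replicate, beq_iff_eq, Nat.cast_zero]
    by_cases h : x = 0
    · subst h; simp
    · have h2 : ¬ (0 ≤ x ∧ x ≤ 0) := by omega
      simp [Ne.symm h, h2]
  | succ v ih =>
    have e : ((v+1 : Nat) : Int) = (v : Int) + 1 := by push_cast; ring
    simp only [descFrom, List.count_append, List.count_replicate, beq_iff_eq, ih, e]
    by_cases h : x = (v : Int) + 1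
    · rw [if_pos h.symm, if_neg (by omega), if_pos (by omega)]
      subst h; omega
    · rw [if_neg (fun e => h e.symm)]
      by_cases h1 : 0 ≤ x ∧ x ≤ (v : Int)
      · rw [if_pos h1, if_pos (by omega)]; omega
      · rw [if_neg h1, if_neg (by omega)]

theorem mem_descFrom_le (c : Int → Nat) (v : Nat) (x : Int) (hx : x ∈ descFrom c v) : x ≤ (v : Int) := by
  induction v with
  | zero => simp only [descFrom] at hx; rw [List.eq_of_mem_replicate hx]; norm_num
  | succ v ih =>
    simp only [descFrom, List.mem_append] at hx
    rcases hx with hx | hx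
    · rw [List.eq_of_mem_replicate hx]; push_cast; omega
    · have := ih hx; push_cast; omega

theorem pairwise_descFrom (c : Int → Nat) (v : Nat) :
    (descFrom c v).Pairwise (fun a b => b ≤ a) := by
  induction v with
  | zero => exact List.pairwise_replicate.mpr (Or.inr le_rfl)
  | succ v ih =>
    rw [descFrom, List.pairwise_append]
    refine ⟨List.pairwise_replicate.mpr (Or.inr le_rfl), ih, ?_⟩
    intro a ha b hb
    rw [List.eq_of_mem_replicate ha]
    have := mem_descFrom_le c v b hb; omega

-- A's sorted descending list IS the histogram laid out descending
theorem sorted_eq_descFrom (ranks : List Int)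
    (hb : ∀ x ∈ ranks, 0 ≤ x ∧ x ≤ 14) :
    PySem.List.sorted ranks (fun x => x) true = descFrom (fun v => ranks.count v) 14 := by
  apply PySem.List.eq_of_perm_of_pairwise_le_of_injective (fun x : Int => -x) neg_injective
  · refine (PySem.List.sorted_perm ranks _ true).trans (List.perm_iff_count.mpr ?_)
    intro x
    rw [count_descFrom]
    by_cases h : 0 ≤ x ∧ x ≤ ((14 : Nat) : Int)
    · rw [if_pos h]
    · rw [if_neg h, List.count_eq_zero]
      intro hx
      exact h ⟨(hb x hx).1, by have := (hb x hx).2; omega⟩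
  · exact (PySem.List.sorted_pairwise_rev ranks _).imp (by intro a b h; omega)
  · exact (pairwise_descFrom _ 14).imp (by intro a b h; omega)

-- sum of the first n of a descending layout, computed by the countdown scan
theorem scanDown_eq (counts : List Int) (c : Int → Nat)
    (hcnt : ∀ u : Nat, u < 15 → counts.getD u 0 = (c (u : Int) : Int))
    (hc1 : c 1 = 0) :
    ∀ v : Nat, 1 ≤ v → v < 15 → ∀ need total : Int, 0 ≤ need →
      scanDown counts v need total = total + ((descFrom c v).take need.toNat).sum := by
  intro v
  induction v with
  | zero => omega
  | succ v ih =>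
    intro _ hv15 need total hneed
    match v with
    | 0 =>
      have hlay : descFrom c 1 = List.replicate (c 0) 0 := by
        norm_num [descFrom, hc1]
      show total = _
      rw [hlay, List.take_replicate, List.sum_replicate]
      simp
    | w+1 =>
      show scanDown counts (w+2) need total = _
      rw [scanDown, hcnt (w+2) (by omega)]
      have e : ((w+1 : Nat) : Int) + 1 = ((w+2 : Nat) : Int) := by push_cast; ring
      set k := c ((w+2 : Nat) : Int) with hk
      have hlay : descFrom c (w+2) = List.replicate k (((w+2 : Nat) : Int)) ++ descFrom c (w+1) := by
        show descFrom c ((w+1)+1) = _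
        rw [descFrom, e]
      rw [hlay, List.take_append, List.take_replicate, List.sum_append, List.sum_replicate,
        List.length_replicate]
      by_cases hz : need - min ((k : Int)) need = 0
      · -- need ≤ k: the break fires, the tail take is empty
        have h1 : min need.toNat k = need.toNat := by omega
        have h2 : need.toNat - k = 0 := by omega
        rw [if_pos hz, h1, h2, List.take_zero, List.sum_nil, add_zero, nsmul_eq_mul]
        have hm : min ((k : Int)) need = need := by omega
        have hn : ((need.toNat : Int)) = need := by omega
        rw [hm, hn]; push_cast; ring
      · -- k < need: take the whole replicate and recurse
        have hmin : min ((k : Int)) need = (k : Int) := by omega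
        rw [if_neg hz, hmin,
          ih (by omega) (by omega) (need - (k : Int)) _ (by omega)]
        have h1 : min need.toNat k = k := by omega
        have h2 : (need - (k : Int)).toNat = need.toNat - k := by omega
        rw [h1, h2, nsmul_eq_mul]; push_cast; ring

theorem getD_hist (cards : List String) :
    ∀ u : Nat, u < 15 →
      (cards.foldl (fun cnt card => cnt.modify (cardRank card).toNat (· + 1)) (List.replicate 15 0)).getD u 0
        = ((cards.map (fun card => cardRank card)).count ((u : Nat) : Int) : Int) := by
  suffices h : ∀ (cnt : List Int), cnt.length = 15 → ∀ u : Nat, u < 15 →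
      (cards.foldl (fun cnt card => cnt.modify (cardRank card).toNat (· + 1)) cnt).getD u 0
        = cnt.getD u 0 + ((cards.map (fun card => cardRank card)).count ((u : Nat) : Int) : Int) by
    intro u hu
    rw [h (List.replicate 15 0) (by simp) u hu, List.getD_eq_getElem?_getD,
      List.getElem?_replicate]
    split <;> simp
  induction cards with
  | nil => intro cnt _ u hu; simp
  | cons card cards ih =>
    intro cnt hlen u hu
    have hb := cardRank_bounds card
    have hlt : (cardRank card).toNat < 15 := by omega
    rw [List.foldl_cons, ih _ (by rw [List.length_modify]; exact hlen) u hu]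
    simp only [List.getD_eq_getElem?_getD, List.getElem?_modify, List.map_cons, List.count_cons]
    by_cases he : (cardRank card).toNat = u
    · have hcr : cardRank card = ((u : Nat) : Int) := by omega
      have hin : u < cnt.length := by omega
      simp [List.getElem?_eq_getElem hin, hcr]
      ring
    · simp [he]
      omega

theorem main_eq (hole board : List String) :
    evaluate_hand_simple_py hole board = evaluate_hand_simple_py_alt hole board := by
  set ranks := (hole ++ board).map (fun card => cardRank card) with hranks
  set c : Int → Nat := fun v => ranks.count v with hc
  have hc1 : c 1 = 0 := by
    rw [hc, List.count_eq_zero]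
    intro hmem
    obtain ⟨card, _, hcr⟩ := List.mem_map.mp (hranks ▸ hmem)
    exact (cardRank_bounds card).2.2 hcr
  have hsorted : PySem.List.sorted ranks (fun x => x) true = descFrom c 14 := by
    apply sorted_eq_descFrom
    intro x hx
    obtain ⟨card, _, hcr⟩ := List.mem_map.mp (hranks ▸ hx)
    have := cardRank_bounds card
    omega
  have hB : evaluate_hand_simple_py_alt hole board = ((descFrom c 14).take 5).sum := by
    unfold evaluate_hand_simple_py_alt
    rw [scanDown_eq _ c (fun u hu => getD_hist (hole ++ board) u hu) hc1 14
      (by omega) (by omega) 5 0 (by omega)]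
    rw [zero_add, show Int.toNat 5 = 5 from rfl]
  have hA : evaluate_hand_simple_py hole board = ((descFrom c 14).take 5).sum := by
    unfold evaluate_hand_simple_py
    by_cases hnil : hole ++ board = []
    · rw [if_pos hnil]
      have h0 : ranks = [] := by rw [hranks, hnil]; rfl
      rw [← hsorted, h0]
      rfl
    · rw [if_neg hnil]
      show (List.take 5 (PySem.List.sorted ((hole ++ board).map (fun card => cardRank card)) (fun x => x) true)).sum = _
      rw [← hranks, hsorted]
  rw [hA, hB]

-- ===== VERDICT (by name: the statement is the Claim_ definition above) =====
theorem evaluate_hand_simple_py_spec : Claim_equal_evaluate_hand_simple_py := by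
  intro hole board _ _
  exact main_eq hole board
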